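-- pv_equiv track=rewrite | github.com/Joopy-KR/algorithm | 백준/Bronze/8958. OX퀴즈/OX퀴즈.py | solve
-- ===== SOURCE A (Python) =====
-- def solve(arr):
--     result = 0
--     cnt = 0
--     for i in range(len(arr)):
--         if arr[i] == 'O':
--             result += cnt
--             cnt += 1
--         else:
--             result += cnt
--             cnt = 0
--     result += cnt
--     return result
-- ===== SOURCE B (Python) =====
-- def solve(arr):
--     total = 0
--     i = 0
--     n = len(arr)
--     while i < n:
--         if arr[i] == 'O':
--             j = i
--             while j < n and arr[j] == 'O':
--                 j += 1
--             L = j - i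
--             total += L * (L + 1) // 2
--             i = j
--         else:
--             i += 1
--     return total
-- ===== Notes on version B (the rewrite author's own statement) =====
-- stated objective: alternative
-- what changed: B scans maximal runs of consecutive 'O's and adds the closed form L*(L+1)//2 per run, instead of A's per-element score counter accumulated at every index.
import Mathlib
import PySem

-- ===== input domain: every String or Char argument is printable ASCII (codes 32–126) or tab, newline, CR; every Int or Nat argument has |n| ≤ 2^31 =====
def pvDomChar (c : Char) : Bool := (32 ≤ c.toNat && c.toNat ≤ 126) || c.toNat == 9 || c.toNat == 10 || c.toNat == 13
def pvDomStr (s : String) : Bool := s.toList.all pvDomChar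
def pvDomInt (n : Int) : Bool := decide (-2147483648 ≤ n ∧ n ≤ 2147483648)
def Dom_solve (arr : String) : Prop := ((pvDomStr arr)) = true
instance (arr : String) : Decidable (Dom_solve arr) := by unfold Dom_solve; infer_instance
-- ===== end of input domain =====

-- B groups the string into maximal runs of 'O' and adds the closed form L*(L+1)//2 per run;
-- A keeps a per-element counter. Equivalence is exact on all inputs.

-- ===== PORT A =====
-- for i in range(len(arr)): update (result, cnt); finally result + cnt
def solve (arr : String) : Int :=
  let st := arr.toList.foldl
    (fun (p : Int × Int) c =>
      if c == 'O' then (p.1 + p.2, p.2 + 1) else (p.1 + p.2, 0))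
    (0, 0)
  st.1 + st.2

-- ===== PORT B =====
-- outer while: at an 'O' take the whole maximal run (inner while = takeWhile/dropWhile),
-- add L*(L+1)//2 (Python //, ported as PySem.Int.floordiv); at a non-'O' step one char.
def runsSum : List Char → Int
  | [] => 0
  | c :: rest =>
    if c == 'O' then
      let L : Int := ((rest.takeWhile (· == 'O')).length : Int) + 1
      PySem.Int.floordiv (L * (L + 1)) 2 + runsSum (rest.dropWhile (· == 'O'))
    else
      runsSum rest
termination_by l => l.length
decreasing_by
  · exact Nat.lt_succ_of_le (List.length_dropWhile_le _ _)
  · exact Nat.lt_succ_self _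

def solve_alt (arr : String) : Int := runsSum arr.toList

-- ===== PRECONDITION & SPEC =====
def Spec_solve (arr : String) (out : Int) : Prop := out = solve_alt arr
instance (arr : String) (out : Int) : Decidable (Spec_solve arr out) := by unfold Spec_solve; infer_instance

-- ===== CLAIM (what is proved, stated in full; the proofs are below) =====
def Claim_equal_solve : Prop := ∀ (arr : String), Dom_solve arr → Spec_solve arr (solve arr)

-- ===== LEMMAS AND PROOFS =====

-- running value of A's fold, separating the counter
def G : List Char → Int → Int
  | [], cnt => cnt
  | c :: rest, cnt => cnt + (if c == 'O' then G rest (cnt + 1) else G rest 0)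

def stepA : Int × Int → Char → Int × Int :=
  fun p c => if c == 'O' then (p.1 + p.2, p.2 + 1) else (p.1 + p.2, 0)

lemma foldA_eq_G (l : List Char) : ∀ (r cnt : Int),
    (l.foldl stepA (r, cnt)).1 + (l.foldl stepA (r, cnt)).2 = r + G l cnt := by
  induction l with
  | nil => intro r cnt; simp [G]
  | cons c rest ih =>
    intro r cnt
    by_cases h : c == 'O' <;> simp [stepA, G, h, ih] <;> ring

def kO (l : List Char) : Nat := (l.takeWhile (· == 'O')).length

def Tri (k : Nat) : Int := PySem.Int.floordiv ((k : Int) * ((k : Int) + 1)) 2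

lemma Tri_eq (k : Nat) : Tri k = ((k * (k + 1) / 2 : Nat) : Int) := by
  unfold Tri
  have : ((k : Int) * ((k : Int) + 1)) = ((k * (k + 1) : Nat) : Int) := by push_cast; ring
  rw [this]
  exact_mod_cast PySem.Int.floordiv_natCast (k * (k + 1)) 2

lemma Tri_succ (k : Nat) : Tri (k + 1) = Tri k + (k + 1) := by
  rw [Tri_eq, Tri_eq]
  have h : (k + 1) * (k + 1 + 1) = k * (k + 1) + 2 * (k + 1) := by ring
  have h2 : (k + 1) * (k + 1 + 1) / 2 = k * (k + 1) / 2 + (k + 1) := by omega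
  rw [h2]; push_cast; ring

lemma kO_cons_O (rest : List Char) : kO ('O' :: rest) = kO rest + 1 := by
  simp [kO]

lemma runsSum_split (l : List Char) :
    runsSum l = Tri (kO l) + runsSum (l.dropWhile (· == 'O')) := by
  cases l with
  | nil => simp [runsSum, kO, Tri, PySem.Int.floordiv]
  | cons c rest =>
    by_cases h : c == 'O'
    · have hc : c = 'O' := by simpa using h
      subst hc
      rw [runsSum, if_pos (by decide : ('O' == 'O') = true), kO_cons_O]
      have hd : ('O' :: rest).dropWhile (· == 'O') = rest.dropWhile (· == 'O') := by
        simp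
      rw [hd]
      have harg : ((((rest.takeWhile (· == 'O')).length : Int) + 1) * ((((rest.takeWhile (· == 'O')).length : Int) + 1) + 1)) = ((kO rest + 1 : Nat) : Int) * (((kO rest + 1 : Nat) : Int) + 1) := by
        simp [kO]
      simp only [Tri, harg]
    · have hk : kO (c :: rest) = 0 := by simp [kO, h]
      have hd : (c :: rest).dropWhile (· == 'O') = c :: rest := by
        simp [h]
      have ht : Tri 0 = 0 := by decide
      rw [hk, hd, ht, zero_add]

lemma G_eq (l : List Char) : ∀ cnt : Int,
    G l cnt = cnt * ((kO l : Int) + 1) + runsSum l := by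
  induction l with
  | nil => intro cnt; simp [G, runsSum, kO]
  | cons c rest ih =>
    intro cnt
    by_cases h : c == 'O'
    · have hc : c = 'O' := by simpa using h
      subst hc
      have hr : runsSum ('O' :: rest) = runsSum rest + ((kO rest : Int) + 1) := by
        have h1 := runsSum_split ('O' :: rest)
        have h2 := runsSum_split rest
        rw [kO_cons_O] at h1
        have hd : ('O' :: rest).dropWhile (· == 'O') = rest.dropWhile (· == 'O') := by
          simp
        rw [hd, Tri_succ] at h1
        rw [h1, h2]; push_cast; ring
      simp only [G, if_pos (by decide : ('O' == 'O') = true)]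
      rw [ih (cnt + 1), hr, kO_cons_O]
      push_cast; ring
    · have hr : runsSum (c :: rest) = runsSum rest := by
        rw [runsSum, if_neg (by simpa using h)]
      have hk : kO (c :: rest) = 0 := by
        simp [kO, h]
      simp only [G, if_neg h]
      rw [ih 0, hr, hk]
      push_cast; ring

-- ===== VERDICT (by name: the statement is the Claim_ definition above) =====
theorem solve_spec : Claim_equal_solve := by
  intro arr _
  unfold Spec_solve solve_alt
  show (arr.toList.foldl stepA (0, 0)).1 + (arr.toList.foldl stepA (0, 0)).2 = runsSum arr.toList
  rw [foldA_eq_G arr.toList 0 0, G_eq arr.toList 0]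
  ring
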